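-- pv_equiv track=rewrite | github.com/mrvoid1701-code/Qng_Workspace | scripts/run_coordfree_ds_final.py | build_4d_lattice
-- ===== SOURCE A (Python) =====
-- SEED    = 3401
--
-- def build_4d_lattice(L, rng_seed=SEED):
--     n = L**4
--     def idx(i,j,k,l): return (i%L)*L**3+(j%L)*L**2+(k%L)*L+(l%L)
--     adj = [set() for _ in range(n)]
--     for i in range(L):
--         for j in range(L):
--             for k in range(L):
--                 for l in range(L):
--                     v = idx(i,j,k,l)
--                     for di,dj,dk,dl in [(1,0,0,0),(0,1,0,0),(0,0,1,0),(0,0,0,1)]: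
--                         u = idx(i+di,j+dj,k+dk,l+dl)
--                         if v < u: adj[v].add(u); adj[u].add(v)
--     return [sorted(s) for s in adj]
-- ===== SOURCE B (Python) =====
-- SEED = 3401
--
-- def build_4d_lattice(L, rng_seed=SEED):
--     # Single flat loop over vertex ids; decode coordinates and emit each
--     # vertex's neighbour list directly in ascending order (no sets, no sort).
--     n = L**4
--     out = []
--     for v in range(n):
--         i = v // L**3 % L
--         j = v // L**2 % L
--         k = v // L % L
--         l = v % L
--         nbrs = []
--         for c, s in ((i, L**3), (j, L**2), (k, L), (l, 1)):
--             if c > 0: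
--                 nbrs.append(v - s)
--         for c, s in ((l, 1), (k, L), (j, L**2), (i, L**3)):
--             if c < L - 1:
--                 nbrs.append(v + s)
--         out.append(nbrs)
--     return out
-- ===== Notes on version B (the rewrite author's own statement) =====
-- stated objective: alternative
-- what changed: Replaces the four nested coordinate loops + shared edge-sets + per-vertex sort by a single flat loop over vertex ids that decodes each vertex's coordinates via divmod and emits its neighbour list directly in ascending order, with no sets and no sorting.
import Mathlib
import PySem

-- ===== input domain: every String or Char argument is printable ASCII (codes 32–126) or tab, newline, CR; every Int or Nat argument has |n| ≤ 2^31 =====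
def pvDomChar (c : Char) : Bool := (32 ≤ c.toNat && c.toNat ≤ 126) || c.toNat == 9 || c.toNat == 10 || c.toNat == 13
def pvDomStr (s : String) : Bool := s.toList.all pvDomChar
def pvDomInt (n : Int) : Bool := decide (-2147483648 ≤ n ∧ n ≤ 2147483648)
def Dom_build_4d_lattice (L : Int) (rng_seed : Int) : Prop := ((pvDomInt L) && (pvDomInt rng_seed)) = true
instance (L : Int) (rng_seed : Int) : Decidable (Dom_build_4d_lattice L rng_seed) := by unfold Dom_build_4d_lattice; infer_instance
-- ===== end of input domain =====

-- B replaces the nested coordinate loops + shared edge-sets + per-vertex sort of A by one flat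
-- loop over vertex ids emitting each vertex's neighbour list directly in ascending order.

-- ===== PORT A =====
-- list indices v, u used below always lie in [0, n), so pyGetD/pySetD with default ∅ are exact
def build_4d_lattice (L : Int) (rng_seed : Int) : List (List Int) :=
  let n := L ^ 4
  let idx : Int → Int → Int → Int → Int := fun i j k l =>
    PySem.Int.mod i L * L ^ 3 + PySem.Int.mod j L * L ^ 2 + PySem.Int.mod k L * L + PySem.Int.mod l L
  let adj0 : List (PySem.Set Int) := (PySem.List.pyRange 0 n 1).map fun _ => PySem.Set.empty
  let adj :=
    (PySem.List.pyRange 0 L 1).foldl (fun a i =>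
      (PySem.List.pyRange 0 L 1).foldl (fun a j =>
        (PySem.List.pyRange 0 L 1).foldl (fun a k =>
          (PySem.List.pyRange 0 L 1).foldl (fun a l =>
            let v := idx i j k l
            ([((1:Int),(0:Int),(0:Int),(0:Int)), (0,1,0,0), (0,0,1,0), (0,0,0,1)]).foldl (fun a d =>
              let u := idx (i + d.1) (j + d.2.1) (k + d.2.2.1) (l + d.2.2.2)
              if v < u then
                let a1 := PySem.List.pySetD a v (PySem.Set.add (PySem.List.pyGetD a v PySem.Set.empty) u)
                PySem.List.pySetD a1 u (PySem.Set.add (PySem.List.pyGetD a1 u PySem.Set.empty) v)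
              else a) a) a) a) a) adj0
  adj.map fun s => PySem.List.sorted s (fun x => x) false

-- ===== PORT B =====
def build_4d_lattice_alt (L : Int) (rng_seed : Int) : List (List Int) :=
  let n := L ^ 4
  (PySem.List.pyRange 0 n 1).foldl (fun out v =>
    let i := PySem.Int.mod (PySem.Int.floordiv v (L ^ 3)) L
    let j := PySem.Int.mod (PySem.Int.floordiv v (L ^ 2)) L
    let k := PySem.Int.mod (PySem.Int.floordiv v L) L
    let l := PySem.Int.mod v L
    let nbrs := ([(i, L ^ 3), (j, L ^ 2), (k, L), (l, (1:Int))]).foldl (fun nbrs cs =>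
        if cs.1 > 0 then nbrs ++ [v - cs.2] else nbrs) []
    let nbrs := ([(l, (1:Int)), (k, L), (j, L ^ 2), (i, L ^ 3)]).foldl (fun nbrs cs =>
        if cs.1 < L - 1 then nbrs ++ [v + cs.2] else nbrs) nbrs
    out ++ [nbrs]) []

-- ===== PRECONDITION & SPEC =====
def Spec_build_4d_lattice (L : Int) (rng_seed : Int) (out : List (List Int)) : Prop := out = build_4d_lattice_alt L rng_seed
instance (L : Int) (rng_seed : Int) (out : List (List Int)) : Decidable (Spec_build_4d_lattice L rng_seed out) := by unfold Spec_build_4d_lattice; infer_instance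

-- ===== CLAIM (what is proved, stated in full; the proofs are below) =====
def Claim_equal_build_4d_lattice : Prop := ∀ (L : Int) (rng_seed : Int), Dom_build_4d_lattice L rng_seed → Spec_build_4d_lattice L rng_seed (build_4d_lattice L rng_seed)

-- ===== LEMMAS AND PROOFS =====

-- proof-side helpers (used only by the lemmas below)
def pvIdx (L i j k l : Int) : Int :=
  PySem.Int.mod i L * L ^ 3 + PySem.Int.mod j L * L ^ 2 + PySem.Int.mod k L * L + PySem.Int.mod l L

def pvAddE (a : List (PySem.Set Int)) (p : Int × Int) : List (PySem.Set Int) :=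
  if p.1 < p.2 then
    let a1 := PySem.List.pySetD a p.1 (PySem.Set.add (PySem.List.pyGetD a p.1 PySem.Set.empty) p.2)
    PySem.List.pySetD a1 p.2 (PySem.Set.add (PySem.List.pyGetD a1 p.2 PySem.Set.empty) p.1)
  else a

def pvPairs (L i j k l : Int) : List (Int × Int) :=
  [(pvIdx L i j k l, pvIdx L (i+1) j k l), (pvIdx L i j k l, pvIdx L i (j+1) k l),
   (pvIdx L i j k l, pvIdx L i j (k+1) l), (pvIdx L i j k l, pvIdx L i j k (l+1))]

def pvAll (L : Int) : List (Int × Int) :=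
  (PySem.List.pyRange 0 L 1).flatMap fun i =>
    (PySem.List.pyRange 0 L 1).flatMap fun j =>
      (PySem.List.pyRange 0 L 1).flatMap fun k =>
        (PySem.List.pyRange 0 L 1).flatMap fun l => pvPairs L i j k l

def pvNbrs (w : Int) (es : List (Int × Int)) : List Int :=
  es.flatMap fun p =>
    if p.1 < p.2 then (if p.1 = w then [p.2] else []) ++ (if p.2 = w then [p.1] else []) else []

def pvAsc (L w : Int) : List Int :=
  (if PySem.Int.mod (PySem.Int.floordiv w (L ^ 3)) L > 0 then [w - L ^ 3] else []) ++
  (if PySem.Int.mod (PySem.Int.floordiv w (L ^ 2)) L > 0 then [w - L ^ 2] else []) ++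
  (if PySem.Int.mod (PySem.Int.floordiv w L) L > 0 then [w - L] else []) ++
  (if PySem.Int.mod w L > 0 then [w - 1] else []) ++
  (if PySem.Int.mod w L < L - 1 then [w + 1] else []) ++
  (if PySem.Int.mod (PySem.Int.floordiv w L) L < L - 1 then [w + L] else []) ++
  (if PySem.Int.mod (PySem.Int.floordiv w (L ^ 2)) L < L - 1 then [w + L ^ 2] else []) ++
  (if PySem.Int.mod (PySem.Int.floordiv w (L ^ 3)) L < L - 1 then [w + L ^ 3] else [])

def pvAdj0 (L : Int) : List (PySem.Set Int) :=
  (PySem.List.pyRange 0 (L ^ 4) 1).map fun _ => PySem.Set.empty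

lemma pvB_eq_map (L r : Int) :
    build_4d_lattice_alt L r = (PySem.List.pyRange 0 (L ^ 4) 1).map (pvAsc L) := by
  unfold build_4d_lattice_alt
  rw [PySem.List.foldl_append_singleton_eq_map]
  simp only [List.nil_append]
  apply List.map_congr_left
  intro v _
  have hif : ∀ (c : Prop) [Decidable c] (acc : List Int) (x : Int),
      (if c then acc ++ [x] else acc) = acc ++ (if c then [x] else []) := by
    intro c _ acc x; split <;> simp
  simp only [List.foldl_cons, List.foldl_nil, hif, List.append_assoc, List.nil_append]
  simp [pvAsc, List.append_assoc]

lemma pvFoldl_flatMap {α β γ : Type} (l : List α) (g : α → List β) (f : γ → β → γ) (init : γ) :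
    (l.flatMap g).foldl f init = l.foldl (fun a x => (g x).foldl f a) init := by
  induction l generalizing init with
  | nil => rfl
  | cons x xs ih => simp [List.foldl_append, ih]

lemma pvA_eq_fold (L r : Int) :
    build_4d_lattice L r =
      ((pvAll L).foldl pvAddE (pvAdj0 L)).map fun s => PySem.List.sorted s (fun x => x) false := by
  unfold build_4d_lattice pvAdj0
  simp only [pvAll, pvFoldl_flatMap]
  congr 1
  apply PySem.List.foldl_congr_mem
  intro a i _
  apply PySem.List.foldl_congr_mem
  intro a j _
  apply PySem.List.foldl_congr_mem
  intro a k _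
  apply PySem.List.foldl_congr_mem
  intro a l _
  simp [pvPairs, pvAddE, pvIdx, List.foldl_cons, List.foldl_nil]

lemma pvLength_pvAddE (a : List (PySem.Set Int)) (p : Int × Int) : (pvAddE a p).length = a.length := by
  unfold pvAddE; split <;> simp [PySem.List.length_pySetD]

lemma pvLength_foldl (es : List (Int × Int)) (a : List (PySem.Set Int)) :
    (es.foldl pvAddE a).length = a.length := by
  induction es generalizing a with
  | nil => rfl
  | cons p es ih => simp [List.foldl_cons, ih, pvLength_pvAddE]

lemma pvGetD_pySetD_int (xs : List (PySem.Set Int)) (i j : Int) (v d : PySem.Set Int)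
    (hi : 0 ≤ i) (hj : 0 ≤ j) (_hilen : i < (xs.length : Int)) (hjlen : j < (xs.length : Int)) :
    PySem.List.pyGetD (PySem.List.pySetD xs i v) j d = if j = i then v else PySem.List.pyGetD xs j d := by
  rw [PySem.List.pySetD_of_nonneg _ _ hi,
      PySem.List.pyGetD_eq_getElem _ _ hj (by simpa using hjlen),
      PySem.List.pyGetD_eq_getElem _ _ hj hjlen,
      List.getElem_set]
  by_cases h : j = i
  · rw [if_pos h, if_pos (by omega)]
  · rw [if_neg h, if_neg (by omega)]

lemma pvGetD_foldl (es : List (Int × Int)) (a : List (PySem.Set Int)) (w : Int)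
    (hw : 0 ≤ w) (hwlen : w < (a.length : Int))
    (hes : ∀ p ∈ es, p.1 < p.2 → 0 ≤ p.1 ∧ p.1 < (a.length : Int) ∧ 0 ≤ p.2 ∧ p.2 < (a.length : Int)) :
    PySem.List.pyGetD (es.foldl pvAddE a) w PySem.Set.empty =
      List.foldl PySem.Set.add (PySem.List.pyGetD a w PySem.Set.empty) (pvNbrs w es) := by
  induction es generalizing a with
  | nil => rfl
  | cons p es ih =>
    have hstep : PySem.List.pyGetD (pvAddE a p) w PySem.Set.empty =
        List.foldl PySem.Set.add (PySem.List.pyGetD a w PySem.Set.empty)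
          (if p.1 < p.2 then (if p.1 = w then [p.2] else []) ++ (if p.2 = w then [p.1] else []) else []) := by
      unfold pvAddE
      by_cases hlt : p.1 < p.2
      · obtain ⟨h1, h2, h3, h4⟩ := hes p (by simp) hlt
        simp only [if_pos hlt]
        rw [pvGetD_pySetD_int _ _ _ _ _ h3 hw (by simpa [PySem.List.length_pySetD] using h4)
              (by simpa [PySem.List.length_pySetD] using hwlen),
            pvGetD_pySetD_int _ _ _ _ _ h1 hw h2 hwlen,
            pvGetD_pySetD_int _ _ _ _ _ h1 h3 h2 h4]
        by_cases hw2 : w = p.2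
        · rw [if_pos hw2, if_neg (by omega : ¬ (p.2 = p.1)), if_neg (by omega : ¬ (p.1 = w)),
              if_pos hw2.symm]
          simp [hw2]
        · by_cases hw1 : w = p.1
          · rw [if_neg hw2, if_pos hw1, if_pos hw1.symm, if_neg (by omega : ¬ (p.2 = w))]
            simp [hw1]
          · rw [if_neg hw2, if_neg hw1, if_neg (by omega : ¬ (p.1 = w)), if_neg (by omega : ¬ (p.2 = w))]
            simp
      · simp [if_neg hlt]
    rw [List.foldl_cons,
        ih (pvAddE a p) (by simpa [pvLength_pvAddE] using hwlen)
          (by intro q hq hlt; simpa [pvLength_pvAddE] using hes q (by simp [hq]) hlt),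
        hstep]
    simp only [pvNbrs, List.flatMap_cons, List.foldl_append]

lemma pvModSelf {L c : Int} (h0 : 0 ≤ c) (h1 : c < L) : PySem.Int.mod c L = c := by
  rw [PySem.Int.mod_eq_emod_of_pos (by omega)]; exact Int.emod_eq_of_lt h0 h1

lemma pvModTop {L c : Int} (hL : 0 < L) (h : c = L) : PySem.Int.mod c L = 0 := by
  rw [h, PySem.Int.mod_eq_emod_of_pos hL]; exact Int.emod_self

lemma pvDigitBound {L a r M : Int} (hM : 0 < M) (ha : 0 ≤ a) (haL : a < L) (hr : 0 ≤ r) (hrM : r < M) :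
    0 ≤ a * M + r ∧ a * M + r < L * M := by
  constructor
  · nlinarith
  · nlinarith

-- decode of an encoded digit tuple

lemma pvDec (L i j k l : Int) (hL : 0 < L) (hi : 0 ≤ i ∧ i < L) (hj : 0 ≤ j ∧ j < L)
    (hk : 0 ≤ k ∧ k < L) (hl : 0 ≤ l ∧ l < L) :
    PySem.Int.mod (PySem.Int.floordiv (i*L^3 + j*L^2 + k*L + l) (L^3)) L = i ∧
    PySem.Int.mod (PySem.Int.floordiv (i*L^3 + j*L^2 + k*L + l) (L^2)) L = j ∧
    PySem.Int.mod (PySem.Int.floordiv (i*L^3 + j*L^2 + k*L + l) L) L = k ∧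
    PySem.Int.mod (i*L^3 + j*L^2 + k*L + l) L = l := by
  have hL2 : (0:Int) < L^2 := by positivity
  have hL3 : (0:Int) < L^3 := by positivity
  have hb1 : 0 ≤ k*L + l ∧ k*L + l < L*L :=
    pvDigitBound hL hk.1 hk.2 hl.1 hl.2
  have hb2 : 0 ≤ j*(L*L) + (k*L + l) ∧ j*(L*L) + (k*L + l) < L*(L*L) :=
    pvDigitBound (by positivity) hj.1 hj.2 hb1.1 hb1.2
  refine ⟨?_, ?_, ?_, ?_⟩
  · have hq : PySem.Int.floordiv (i*L^3 + j*L^2 + k*L + l) (L^3) = i := by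
      rw [PySem.Int.floordiv_eq_iff_of_pos hL3]
      constructor <;> nlinarith [hb2.1, hb2.2]
    rw [hq]; exact pvModSelf hi.1 hi.2
  · have hq : PySem.Int.floordiv (i*L^3 + j*L^2 + k*L + l) (L^2) = i*L + j := by
      rw [PySem.Int.floordiv_eq_iff_of_pos hL2]
      constructor <;> nlinarith [hb1.1, hb1.2]
    rw [hq, PySem.Int.mod_eq_emod_of_pos hL]
    have : i*L + j = j + L*i := by ring
    rw [this, Int.add_mul_emod_self_left]
    exact Int.emod_eq_of_lt hj.1 hj.2
  · have hq : PySem.Int.floordiv (i*L^3 + j*L^2 + k*L + l) L = i*L^2 + j*L + k := by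
      rw [PySem.Int.floordiv_eq_iff_of_pos hL]
      constructor <;> nlinarith [hl.1, hl.2]
    rw [hq, PySem.Int.mod_eq_emod_of_pos hL]
    have : i*L^2 + j*L + k = k + L*(i*L + j) := by ring
    rw [this, Int.add_mul_emod_self_left]
    exact Int.emod_eq_of_lt hk.1 hk.2
  · rw [PySem.Int.mod_eq_emod_of_pos hL]
    have : i*L^3 + j*L^2 + k*L + l = l + L*(i*L^2 + j*L + k) := by ring
    rw [this, Int.add_mul_emod_self_left]
    exact Int.emod_eq_of_lt hl.1 hl.2

-- encode of the decoded digits of any w in range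

lemma pvEnc (L w : Int) (hL : 0 < L) (hw : 0 ≤ w) (hwn : w < L^4) :
    (0 ≤ PySem.Int.mod (PySem.Int.floordiv w (L^3)) L ∧ PySem.Int.mod (PySem.Int.floordiv w (L^3)) L < L) ∧
    (0 ≤ PySem.Int.mod (PySem.Int.floordiv w (L^2)) L ∧ PySem.Int.mod (PySem.Int.floordiv w (L^2)) L < L) ∧
    (0 ≤ PySem.Int.mod (PySem.Int.floordiv w L) L ∧ PySem.Int.mod (PySem.Int.floordiv w L) L < L) ∧
    (0 ≤ PySem.Int.mod w L ∧ PySem.Int.mod w L < L) ∧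
    (PySem.Int.mod (PySem.Int.floordiv w (L^3)) L) * L^3 +
      (PySem.Int.mod (PySem.Int.floordiv w (L^2)) L) * L^2 +
      (PySem.Int.mod (PySem.Int.floordiv w L) L) * L + PySem.Int.mod w L = w := by
  have hL2 : (0:Int) < L^2 := by positivity
  have hL3 : (0:Int) < L^3 := by positivity
  set w1 := PySem.Int.floordiv w L with hw1
  set w2 := PySem.Int.floordiv w1 L with hw2
  set w3 := PySem.Int.floordiv w2 L with hw3
  have e0 : w1 * L + PySem.Int.mod w L = w := PySem.Int.floordiv_mul_add_mod w L
  have e1 : w2 * L + PySem.Int.mod w1 L = w1 := PySem.Int.floordiv_mul_add_mod w1 L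
  have e2 : w3 * L + PySem.Int.mod w2 L = w2 := PySem.Int.floordiv_mul_add_mod w2 L
  have m0 := PySem.Int.mod_nonneg w (b := L) hL
  have m0' := PySem.Int.mod_lt w (b := L) hL
  have m1 := PySem.Int.mod_nonneg w1 (b := L) hL
  have m1' := PySem.Int.mod_lt w1 (b := L) hL
  have m2 := PySem.Int.mod_nonneg w2 (b := L) hL
  have m2' := PySem.Int.mod_lt w2 (b := L) hL
  have q2 : PySem.Int.floordiv w (L^2) = w2 := by
    rw [PySem.Int.floordiv_eq_iff_of_pos hL2]
    constructor <;> nlinarith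
  have q3 : PySem.Int.floordiv w (L^3) = w3 := by
    rw [PySem.Int.floordiv_eq_iff_of_pos hL3]
    constructor <;> nlinarith
  have hw3nn : 0 ≤ w3 := by
    rw [← q3, PySem.Int.le_floordiv_iff_mul_le hL3]; nlinarith
  have hw3lt : w3 < L := by
    rw [← q3, PySem.Int.floordiv_lt_iff_lt_mul hL3]; nlinarith
  have hm3 : PySem.Int.mod w3 L = w3 := pvModSelf hw3nn hw3lt
  rw [q2, q3, hm3]
  refine ⟨⟨hw3nn, hw3lt⟩, ⟨m2, m2'⟩, ⟨m1, m1'⟩, ⟨m0, m0'⟩, by linear_combination e0 + L*e1 + L^2*e2⟩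

lemma pvBlockYes (v w x s : Int) {u : Int} (hs : 0 < s) (hu : u = v + s) :
    (x ∈ (if v < u then (if v = w then [u] else []) ++ (if u = w then [v] else []) else ([]:List Int))) ↔
      ((w = v ∧ x = v + s) ∨ (w = v + s ∧ x = v)) := by
  subst hu
  rw [if_pos (by omega)]
  by_cases h1 : v = w <;> by_cases h2 : v + s = w <;> simp [h1, h2] <;> omega

lemma pvBlockNo (v w x : Int) {u : Int} (hle : ¬ v < u) :
    (x ∈ (if v < u then (if v = w then [u] else []) ++ (if u = w then [v] else []) else ([]:List Int))) ↔ False := by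
  simp [hle]

lemma pvRnkEq (L i j k l : Int) (_hL : 0 < L) (hi : 0 ≤ i ∧ i < L) (hj : 0 ≤ j ∧ j < L)
    (hk : 0 ≤ k ∧ k < L) (hl : 0 ≤ l ∧ l < L) :
    pvIdx L i j k l = i*L^3 + j*L^2 + k*L + l := by
  unfold pvIdx
  rw [pvModSelf hi.1 hi.2, pvModSelf hj.1 hj.2, pvModSelf hk.1 hk.2, pvModSelf hl.1 hl.2]

lemma pvMemPairs (L i j k l w x : Int) (hL : 0 < L) (hi : 0 ≤ i ∧ i < L) (hj : 0 ≤ j ∧ j < L)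
    (hk : 0 ≤ k ∧ k < L) (hl : 0 ≤ l ∧ l < L) :
    x ∈ pvNbrs w (pvPairs L i j k l) ↔
      ((i + 1 < L ∧ ((w = i*L^3+j*L^2+k*L+l ∧ x = i*L^3+j*L^2+k*L+l + L^3) ∨
                     (w = i*L^3+j*L^2+k*L+l + L^3 ∧ x = i*L^3+j*L^2+k*L+l))) ∨
       (j + 1 < L ∧ ((w = i*L^3+j*L^2+k*L+l ∧ x = i*L^3+j*L^2+k*L+l + L^2) ∨
                     (w = i*L^3+j*L^2+k*L+l + L^2 ∧ x = i*L^3+j*L^2+k*L+l))) ∨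
       (k + 1 < L ∧ ((w = i*L^3+j*L^2+k*L+l ∧ x = i*L^3+j*L^2+k*L+l + L) ∨
                     (w = i*L^3+j*L^2+k*L+l + L ∧ x = i*L^3+j*L^2+k*L+l))) ∨
       (l + 1 < L ∧ ((w = i*L^3+j*L^2+k*L+l ∧ x = i*L^3+j*L^2+k*L+l + 1) ∨
                     (w = i*L^3+j*L^2+k*L+l + 1 ∧ x = i*L^3+j*L^2+k*L+l)))) := by
  have hL2 : (0:Int) < L^2 := by positivity
  have hL3 : (0:Int) < L^3 := by positivity
  have hv := pvRnkEq L i j k l hL hi hj hk hl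
  have hblock1 : (x ∈ (if pvIdx L i j k l < pvIdx L (i+1) j k l then
        (if pvIdx L i j k l = w then [pvIdx L (i+1) j k l] else []) ++
        (if pvIdx L (i+1) j k l = w then [pvIdx L i j k l] else []) else [])) ↔
      (i + 1 < L ∧ ((w = i*L^3+j*L^2+k*L+l ∧ x = i*L^3+j*L^2+k*L+l + L^3) ∨
                    (w = i*L^3+j*L^2+k*L+l + L^3 ∧ x = i*L^3+j*L^2+k*L+l))) := by
    by_cases hc : i + 1 < L
    · have hu : pvIdx L (i+1) j k l = pvIdx L i j k l + L^3 := by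
        rw [hv, pvRnkEq L (i+1) j k l hL ⟨by omega, hc⟩ hj hk hl]; ring
      rw [pvBlockYes _ _ _ _ hL3 hu, hv]
      simp [hc]
    · have hieq : i + 1 = L := by omega
      have hu : pvIdx L (i+1) j k l = j*L^2+k*L+l := by
        unfold pvIdx
        rw [pvModTop hL hieq, pvModSelf hj.1 hj.2, pvModSelf hk.1 hk.2, pvModSelf hl.1 hl.2]; ring
      rw [pvBlockNo _ _ _ (by rw [hu, hv]; nlinarith [hi.1])]
      simp [hc]
  have hblock2 : (x ∈ (if pvIdx L i j k l < pvIdx L i (j+1) k l then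
        (if pvIdx L i j k l = w then [pvIdx L i (j+1) k l] else []) ++
        (if pvIdx L i (j+1) k l = w then [pvIdx L i j k l] else []) else [])) ↔
      (j + 1 < L ∧ ((w = i*L^3+j*L^2+k*L+l ∧ x = i*L^3+j*L^2+k*L+l + L^2) ∨
                    (w = i*L^3+j*L^2+k*L+l + L^2 ∧ x = i*L^3+j*L^2+k*L+l))) := by
    by_cases hc : j + 1 < L
    · have hu : pvIdx L i (j+1) k l = pvIdx L i j k l + L^2 := by
        rw [hv, pvRnkEq L i (j+1) k l hL hi ⟨by omega, hc⟩ hk hl]; ring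
      rw [pvBlockYes _ _ _ _ hL2 hu, hv]
      simp [hc]
    · have hjeq : j + 1 = L := by omega
      have hu : pvIdx L i (j+1) k l = i*L^3+k*L+l := by
        unfold pvIdx
        rw [pvModTop hL hjeq, pvModSelf hi.1 hi.2, pvModSelf hk.1 hk.2, pvModSelf hl.1 hl.2]; ring
      rw [pvBlockNo _ _ _ (by rw [hu, hv]; nlinarith [hj.1])]
      simp [hc]
  have hblock3 : (x ∈ (if pvIdx L i j k l < pvIdx L i j (k+1) l then
        (if pvIdx L i j k l = w then [pvIdx L i j (k+1) l] else []) ++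
        (if pvIdx L i j (k+1) l = w then [pvIdx L i j k l] else []) else [])) ↔
      (k + 1 < L ∧ ((w = i*L^3+j*L^2+k*L+l ∧ x = i*L^3+j*L^2+k*L+l + L) ∨
                    (w = i*L^3+j*L^2+k*L+l + L ∧ x = i*L^3+j*L^2+k*L+l))) := by
    by_cases hc : k + 1 < L
    · have hu : pvIdx L i j (k+1) l = pvIdx L i j k l + L := by
        rw [hv, pvRnkEq L i j (k+1) l hL hi hj ⟨by omega, hc⟩ hl]; ring
      rw [pvBlockYes _ _ _ _ hL hu, hv]
      simp [hc]
    · have hkeq : k + 1 = L := by omega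
      have hu : pvIdx L i j (k+1) l = i*L^3+j*L^2+l := by
        unfold pvIdx
        rw [pvModTop hL hkeq, pvModSelf hi.1 hi.2, pvModSelf hj.1 hj.2, pvModSelf hl.1 hl.2]; ring
      rw [pvBlockNo _ _ _ (by rw [hu, hv]; nlinarith [hk.1])]
      simp [hc]
  have hblock4 : (x ∈ (if pvIdx L i j k l < pvIdx L i j k (l+1) then
        (if pvIdx L i j k l = w then [pvIdx L i j k (l+1)] else []) ++
        (if pvIdx L i j k (l+1) = w then [pvIdx L i j k l] else []) else [])) ↔
      (l + 1 < L ∧ ((w = i*L^3+j*L^2+k*L+l ∧ x = i*L^3+j*L^2+k*L+l + 1) ∨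
                    (w = i*L^3+j*L^2+k*L+l + 1 ∧ x = i*L^3+j*L^2+k*L+l))) := by
    by_cases hc : l + 1 < L
    · have hu : pvIdx L i j k (l+1) = pvIdx L i j k l + 1 := by
        rw [hv, pvRnkEq L i j k (l+1) hL hi hj hk ⟨by omega, hc⟩]; ring
      rw [pvBlockYes _ _ _ _ (by omega) hu, hv]
      simp [hc]
    · have hleq : l + 1 = L := by omega
      have hu : pvIdx L i j k (l+1) = i*L^3+j*L^2+k*L := by
        unfold pvIdx
        rw [pvModTop hL hleq, pvModSelf hi.1 hi.2, pvModSelf hj.1 hj.2, pvModSelf hk.1 hk.2]; ring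
      rw [pvBlockNo _ _ _ (by rw [hu, hv]; nlinarith [hl.1])]
      simp [hc]
  simp only [pvNbrs, pvPairs, List.flatMap_cons, List.flatMap_nil, List.append_nil, List.mem_append]
  rw [hblock1, hblock2, hblock3, hblock4]

lemma pvFlatMap_flatMap {α β γ : Type} (l : List α) (g : α → List β) (f : β → List γ) :
    (l.flatMap g).flatMap f = l.flatMap fun a => (g a).flatMap f := by
  induction l with
  | nil => rfl
  | cons a l ih => simp [List.flatMap_cons, List.flatMap_append, ih]

lemma pvMemAll (L w x : Int) :
    x ∈ pvNbrs w (pvAll L) ↔ ∃ i j k l, (0 ≤ i ∧ i < L) ∧ (0 ≤ j ∧ j < L) ∧ (0 ≤ k ∧ k < L) ∧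
      (0 ≤ l ∧ l < L) ∧ x ∈ pvNbrs w (pvPairs L i j k l) := by
  unfold pvNbrs pvAll
  simp only [pvFlatMap_flatMap, List.mem_flatMap, PySem.List.mem_pyRange_one]
  constructor
  · rintro ⟨i, hi, j, hj, k, hk, l, hl, hx⟩
    exact ⟨i, j, k, l, hi, hj, hk, hl, hx⟩
  · rintro ⟨i, j, k, l, hi, hj, hk, hl, hx⟩
    exact ⟨i, hi, j, hj, k, hk, l, hl, hx⟩

lemma pvAscMemIff (L w x : Int) : x ∈ pvAsc L w ↔
    ((PySem.Int.mod (PySem.Int.floordiv w (L ^ 3)) L > 0 ∧ x = w - L ^ 3) ∨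
     (PySem.Int.mod (PySem.Int.floordiv w (L ^ 2)) L > 0 ∧ x = w - L ^ 2) ∨
     (PySem.Int.mod (PySem.Int.floordiv w L) L > 0 ∧ x = w - L) ∨
     (PySem.Int.mod w L > 0 ∧ x = w - 1) ∨
     (PySem.Int.mod w L < L - 1 ∧ x = w + 1) ∨
     (PySem.Int.mod (PySem.Int.floordiv w L) L < L - 1 ∧ x = w + L) ∨
     (PySem.Int.mod (PySem.Int.floordiv w (L ^ 2)) L < L - 1 ∧ x = w + L ^ 2) ∨
     (PySem.Int.mod (PySem.Int.floordiv w (L ^ 3)) L < L - 1 ∧ x = w + L ^ 3)) := by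
  simp only [pvAsc, List.mem_append, List.mem_ite_nil_right, List.mem_singleton]
  simp only [or_assoc]

lemma pvMemAsc (L w x : Int) (hL : 0 < L) (hw : 0 ≤ w) (hwn : w < L^4) :
    x ∈ pvNbrs w (pvAll L) ↔ x ∈ pvAsc L w := by
  obtain ⟨hI, hJ, hK, hL0, hE⟩ := pvEnc L w hL hw hwn
  rw [pvMemAll, pvAscMemIff]
  constructor
  · rintro ⟨i, j, k, l, hi, hj, hk, hl, hmem⟩
    rw [pvMemPairs L i j k l w x hL hi hj hk hl] at hmem
    rcases hmem with ⟨hc, hcase⟩ | ⟨hc, hcase⟩ | ⟨hc, hcase⟩ | ⟨hc, hcase⟩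
    · rcases hcase with ⟨hweq, hxeq⟩ | ⟨hweq, hxeq⟩
      · obtain ⟨d3, d2, d1, d0⟩ := pvDec L i j k l hL hi hj hk hl
        rw [← hweq] at d3 d2 d1 d0
        refine Or.inr (Or.inr (Or.inr (Or.inr (Or.inr (Or.inr (Or.inr ⟨by omega, by omega⟩))))))
      · obtain ⟨d3, d2, d1, d0⟩ := pvDec L (i+1) j k l hL ⟨by omega, hc⟩ hj hk hl
        have hw2 : w = (i+1)*L^3 + j*L^2 + k*L + l := by linear_combination hweq
        rw [← hw2] at d3 d2 d1 d0
        exact Or.inl ⟨by omega, by linear_combination hxeq - hw2⟩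
    · rcases hcase with ⟨hweq, hxeq⟩ | ⟨hweq, hxeq⟩
      · obtain ⟨d3, d2, d1, d0⟩ := pvDec L i j k l hL hi hj hk hl
        rw [← hweq] at d3 d2 d1 d0
        refine Or.inr (Or.inr (Or.inr (Or.inr (Or.inr (Or.inr (Or.inl ⟨by omega, by omega⟩)))))) 
      · obtain ⟨d3, d2, d1, d0⟩ := pvDec L i (j+1) k l hL hi ⟨by omega, hc⟩ hk hl
        have hw2 : w = i*L^3 + (j+1)*L^2 + k*L + l := by linear_combination hweq
        rw [← hw2] at d3 d2 d1 d0
        exact Or.inr (Or.inl ⟨by omega, by linear_combination hxeq - hw2⟩)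
    · rcases hcase with ⟨hweq, hxeq⟩ | ⟨hweq, hxeq⟩
      · obtain ⟨d3, d2, d1, d0⟩ := pvDec L i j k l hL hi hj hk hl
        rw [← hweq] at d3 d2 d1 d0
        refine Or.inr (Or.inr (Or.inr (Or.inr (Or.inr (Or.inl ⟨by omega, by omega⟩)))))
      · obtain ⟨d3, d2, d1, d0⟩ := pvDec L i j (k+1) l hL hi hj ⟨by omega, hc⟩ hl
        have hw2 : w = i*L^3 + j*L^2 + (k+1)*L + l := by linear_combination hweq
        rw [← hw2] at d3 d2 d1 d0
        exact Or.inr (Or.inr (Or.inl ⟨by omega, by linear_combination hxeq - hw2⟩))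
    · rcases hcase with ⟨hweq, hxeq⟩ | ⟨hweq, hxeq⟩
      · obtain ⟨d3, d2, d1, d0⟩ := pvDec L i j k l hL hi hj hk hl
        rw [← hweq] at d3 d2 d1 d0
        refine Or.inr (Or.inr (Or.inr (Or.inr (Or.inl ⟨by omega, by omega⟩))))
      · obtain ⟨d3, d2, d1, d0⟩ := pvDec L i j k (l+1) hL hi hj hk ⟨by omega, hc⟩
        have hw2 : w = i*L^3 + j*L^2 + k*L + (l+1) := by linear_combination hweq
        rw [← hw2] at d3 d2 d1 d0
        exact Or.inr (Or.inr (Or.inr (Or.inl ⟨by omega, by linear_combination hxeq - hw2⟩)))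
  · set i := PySem.Int.mod (PySem.Int.floordiv w (L^3)) L with hidef
    set j := PySem.Int.mod (PySem.Int.floordiv w (L^2)) L with hjdef
    set k := PySem.Int.mod (PySem.Int.floordiv w L) L with hkdef
    set l := PySem.Int.mod w L with hldef
    rintro (⟨hc, hxeq⟩ | ⟨hc, hxeq⟩ | ⟨hc, hxeq⟩ | ⟨hc, hxeq⟩ |
            ⟨hc, hxeq⟩ | ⟨hc, hxeq⟩ | ⟨hc, hxeq⟩ | ⟨hc, hxeq⟩)
    · refine ⟨i - 1, j, k, l, ⟨by omega, by omega⟩, hJ, hK, hL0, ?_⟩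
      rw [pvMemPairs L (i-1) j k l w x hL ⟨by omega, by omega⟩ hJ hK hL0]
      exact Or.inl ⟨by omega, Or.inr ⟨by linear_combination -hE, by linear_combination hxeq - hE⟩⟩
    · refine ⟨i, j - 1, k, l, hI, ⟨by omega, by omega⟩, hK, hL0, ?_⟩
      rw [pvMemPairs L i (j-1) k l w x hL hI ⟨by omega, by omega⟩ hK hL0]
      exact Or.inr (Or.inl ⟨by omega, Or.inr ⟨by linear_combination -hE, by linear_combination hxeq - hE⟩⟩)
    · refine ⟨i, j, k - 1, l, hI, hJ, ⟨by omega, by omega⟩, hL0, ?_⟩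
      rw [pvMemPairs L i j (k-1) l w x hL hI hJ ⟨by omega, by omega⟩ hL0]
      exact Or.inr (Or.inr (Or.inl ⟨by omega, Or.inr ⟨by linear_combination -hE, by linear_combination hxeq - hE⟩⟩))
    · refine ⟨i, j, k, l - 1, hI, hJ, hK, ⟨by omega, by omega⟩, ?_⟩
      rw [pvMemPairs L i j k (l-1) w x hL hI hJ hK ⟨by omega, by omega⟩]
      exact Or.inr (Or.inr (Or.inr ⟨by omega, Or.inr ⟨by linear_combination -hE, by linear_combination hxeq - hE⟩⟩))
    · refine ⟨i, j, k, l, hI, hJ, hK, hL0, ?_⟩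
      rw [pvMemPairs L i j k l w x hL hI hJ hK hL0]
      exact Or.inr (Or.inr (Or.inr ⟨by omega, Or.inl ⟨by linear_combination -hE, by linear_combination hxeq - hE⟩⟩))
    · refine ⟨i, j, k, l, hI, hJ, hK, hL0, ?_⟩
      rw [pvMemPairs L i j k l w x hL hI hJ hK hL0]
      exact Or.inr (Or.inr (Or.inl ⟨by omega, Or.inl ⟨by linear_combination -hE, by linear_combination hxeq - hE⟩⟩))
    · refine ⟨i, j, k, l, hI, hJ, hK, hL0, ?_⟩
      rw [pvMemPairs L i j k l w x hL hI hJ hK hL0]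
      exact Or.inr (Or.inl ⟨by omega, Or.inl ⟨by linear_combination -hE, by linear_combination hxeq - hE⟩⟩)
    · refine ⟨i, j, k, l, hI, hJ, hK, hL0, ?_⟩
      rw [pvMemPairs L i j k l w x hL hI hJ hK hL0]
      exact Or.inl ⟨by omega, Or.inl ⟨by linear_combination -hE, by linear_combination hxeq - hE⟩⟩

lemma pvIfSub (c : Prop) [Decidable c] (y : Int) : (if c then [y] else []).Sublist [y] := by
  split
  · exact List.Sublist.refl _
  · exact List.nil_sublist _

lemma pvFullPairwise (w a b c : Int) (h1 : 1 < a) (h2 : a < b) (h3 : b < c) :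
    ([w - c, w - b, w - a, w - 1, w + 1, w + a, w + b, w + c] : List Int).Pairwise (· < ·) := by
  simp only [List.pairwise_cons, List.mem_cons, List.not_mem_nil, or_false]
  refine ⟨?_, ?_, ?_, ?_, ?_, ?_, ?_, fun a h => absurd h (by simp), List.Pairwise.nil⟩ <;>
    intro y hy <;>
    (try rcases hy with h | h | h | h | h | h | h) <;>
    (try rcases h with h | h | h | h | h | h) <;> omega

lemma pvAscPairwise (L w : Int) (hL2 : 2 ≤ L) : (pvAsc L w).Pairwise (· < ·) := by
  have e2 : L < L^2 := by nlinarith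
  have e3 : L^2 < L^3 := by nlinarith
  have hfull := pvFullPairwise w L (L^2) (L^3) (by omega) e2 e3
  have hsub : (pvAsc L w).Sublist
      ([w - L^3] ++ [w - L^2] ++ [w - L] ++ [w - 1] ++ [w + 1] ++ [w + L] ++ [w + L^2] ++ [w + L^3]) := by
    unfold pvAsc
    exact List.Sublist.append (List.Sublist.append (List.Sublist.append (List.Sublist.append
      (List.Sublist.append (List.Sublist.append (List.Sublist.append (pvIfSub _ _) (pvIfSub _ _))
      (pvIfSub _ _)) (pvIfSub _ _)) (pvIfSub _ _)) (pvIfSub _ _)) (pvIfSub _ _)) (pvIfSub _ _)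
  exact hfull.sublist (by simpa using hsub)

lemma pvIdxBounds (L i j k l : Int) (hL : 0 < L) : 0 ≤ pvIdx L i j k l ∧ pvIdx L i j k l < L^4 := by
  have mi := PySem.Int.mod_nonneg i (b := L) hL
  have mi' := PySem.Int.mod_lt i (b := L) hL
  have mj := PySem.Int.mod_nonneg j (b := L) hL
  have mj' := PySem.Int.mod_lt j (b := L) hL
  have mk := PySem.Int.mod_nonneg k (b := L) hL
  have mk' := PySem.Int.mod_lt k (b := L) hL
  have ml := PySem.Int.mod_nonneg l (b := L) hL
  have ml' := PySem.Int.mod_lt l (b := L) hL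
  have b1 := pvDigitBound (M := L) hL mk mk' ml ml'
  have b2 := pvDigitBound (M := L*L) (by positivity) mj mj' b1.1 b1.2
  have b3 := pvDigitBound (M := L*(L*L)) (by positivity) mi mi' b2.1 b2.2
  unfold pvIdx
  constructor <;> nlinarith [b3.1, b3.2]

lemma pvAllBounds (L : Int) (hL : 0 < L) :
    ∀ p ∈ pvAll L, 0 ≤ p.1 ∧ p.1 < L^4 ∧ 0 ≤ p.2 ∧ p.2 < L^4 := by
  intro p hp
  simp only [pvAll, List.mem_flatMap, pvPairs, List.mem_cons, List.not_mem_nil, or_false] at hp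
  obtain ⟨i, -, j, -, k, -, l, -, hp⟩ := hp
  rcases hp with rfl | rfl | rfl | rfl <;>
    exact ⟨(pvIdxBounds L _ _ _ _ hL).1, (pvIdxBounds L _ _ _ _ hL).2,
           (pvIdxBounds L _ _ _ _ hL).1, (pvIdxBounds L _ _ _ _ hL).2⟩

lemma pvNegCase (L r : Int) (hneg : L < 0) : build_4d_lattice L r = build_4d_lattice_alt L r := by
  rw [pvB_eq_map]
  simp only [build_4d_lattice]
  rw [PySem.List.pyRange_one_eq_nil (le_of_lt hneg)]
  simp only [List.foldl_nil, List.map_map]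
  apply List.map_congr_left
  intro v _
  have hmod : ∀ a : Int, ¬ (PySem.Int.mod a L > 0) ∧ ¬ (PySem.Int.mod a L < L - 1) := by
    intro a
    have := PySem.Int.mod_neg_bounds a hneg
    omega
  simp [pvAsc, (hmod _).1, (hmod _).2]
  rfl

lemma pvMainCase (L r : Int) (hL2 : 2 ≤ L) : build_4d_lattice L r = build_4d_lattice_alt L r := by
  have hL : (0:Int) < L := by omega
  have hn4 : (0:Int) ≤ L^4 := by positivity
  rw [pvA_eq_fold, pvB_eq_map]
  set adjF := (pvAll L).foldl pvAddE (pvAdj0 L) with hadj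
  have hlen0 : (pvAdj0 L).length = (L^4).toNat := by
    simp [pvAdj0, PySem.List.length_pyRange_one]
  have hlen : (adjF.length : Int) = L^4 := by
    rw [hadj, pvLength_foldl, hlen0, Int.toNat_of_nonneg hn4]
  have hA2 : adjF = (PySem.List.pyRange 0 (L^4) 1).map
      (fun w => PySem.List.pyGetD adjF w PySem.Set.empty) := by
    conv_lhs => rw [← PySem.List.map_pyGetD_pyRange_zero' adjF PySem.Set.empty]
    rw [hlen]
  conv_lhs => rw [hA2]
  rw [List.map_map]
  apply List.map_congr_left
  intro w hw
  obtain ⟨hw1, hw2⟩ := PySem.List.mem_pyRange_one.mp hw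
  simp only [Function.comp]
  have hes : ∀ p ∈ pvAll L, p.1 < p.2 →
      0 ≤ p.1 ∧ p.1 < ((pvAdj0 L).length : Int) ∧ 0 ≤ p.2 ∧ p.2 < ((pvAdj0 L).length : Int) := by
    intro p hp _
    have := pvAllBounds L hL p hp
    rw [hlen0, Int.toNat_of_nonneg hn4]
    exact this
  rw [pvGetD_foldl (pvAll L) (pvAdj0 L) w hw1
        (by rw [hlen0, Int.toNat_of_nonneg hn4]; exact hw2) hes]
  have hbase : PySem.List.pyGetD (pvAdj0 L) w PySem.Set.empty = PySem.Set.empty := by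
    unfold pvAdj0
    rw [PySem.List.pyGetD_map_pyRange_of_nonneg _ _ _ _ hw1 hw2]
  rw [hbase]
  have hof : List.foldl PySem.Set.add PySem.Set.empty (pvNbrs w (pvAll L)) =
      PySem.Set.ofList (pvNbrs w (pvAll L)) := (PySem.Set.ofList_eq_foldl _).symm
  rw [hof]
  apply PySem.List.sorted_eq_of_perm_of_pairwise_lt
  · rw [List.perm_ext_iff_of_nodup
      ((pvAscPairwise L w hL2).imp fun h => ne_of_lt h) (PySem.Set.nodup_ofList _)]
    intro x
    rw [PySem.Set.mem_ofList, pvMemAsc L w x hL hw1 hw2]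
  · exact pvAscPairwise L w hL2

-- ===== VERDICT (by name: the statement is the Claim_ definition above) =====
theorem build_4d_lattice_spec : Claim_equal_build_4d_lattice := by
  intro L r _
  unfold Spec_build_4d_lattice
  by_cases h0 : L = 0
  · subst h0; rfl
  · by_cases h1 : L = 1
    · subst h1; rfl
    · rcases Int.lt_or_le L 0 with hneg | hpos
      · exact pvNegCase L r hneg
      · exact pvMainCase L r (by omega)
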